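-- pv_equiv track=rewrite | github.com/Grant-Giesbrecht/ChillyInductor | apps/chirpy/chirpy.py | is_interstitial
-- ===== SOURCE A (Python) =====
-- def is_interstitial(regions, time):
-- 	''' Checks if a time point is in-between trim regions.
--
-- 	Requires that the regions are in chronological order.
--
-- 	Returns:
-- 		In a region: -1
-- 		Outside of all regions: -2
-- 		Between regions: region index of next region.
--
-- 	'''
--
-- 	# Check if in region
-- 	for reg in regions:
-- 		# Check to see if point is in region
-- 		if (time <= reg[1]) and (time >= reg[0]):
-- 			return -1
--
-- 	# Check to see if in between regions
-- 	for idx in range(len(regions)-1):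
-- 		if (time > regions[idx][1]) and (time < regions[idx+1][0]):
-- 			return idx+1
--
-- 	# Outside all bounds
-- 	return -2
-- ===== SOURCE B (Python) =====
-- def is_interstitial(regions, time):
--     # One pass with an accumulator instead of A's two sequential scans:
--     # remember the first gap seen while still scanning for a containing region.
--     gap = None
--     prev_end = None
--     for idx, reg in enumerate(regions):
--         if reg[0] <= time <= reg[1]:
--             return -1
--         if gap is None and prev_end is not None and prev_end < time < reg[0]:
--             gap = idx
--         prev_end = reg[1]
--     return -2 if gap is None else gap
-- ===== Notes on version B (the rewrite author's own statement) =====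
-- stated objective: alternative
-- what changed: Replaces A's two sequential scans (one for containment, one over index pairs for gaps) by a single enumerate pass that carries the previous region's end and the first gap index as accumulator state.
-- outside the precondition, e.g. on is_interstitial([[0, 5], [3]], 2): A returns -1, B returns -1
import Mathlib
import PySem

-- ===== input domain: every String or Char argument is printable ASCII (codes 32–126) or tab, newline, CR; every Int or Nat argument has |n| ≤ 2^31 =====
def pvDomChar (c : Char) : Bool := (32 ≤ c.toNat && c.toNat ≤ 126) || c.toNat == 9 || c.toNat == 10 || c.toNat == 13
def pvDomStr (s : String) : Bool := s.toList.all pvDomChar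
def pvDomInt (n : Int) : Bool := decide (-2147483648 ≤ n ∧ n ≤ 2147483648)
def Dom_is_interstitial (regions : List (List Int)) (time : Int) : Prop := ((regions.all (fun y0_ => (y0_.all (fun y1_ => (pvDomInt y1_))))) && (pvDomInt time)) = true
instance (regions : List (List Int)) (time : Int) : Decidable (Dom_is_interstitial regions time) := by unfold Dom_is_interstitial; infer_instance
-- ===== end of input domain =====

-- B replaces A's two sequential scans by one pass carrying the previous end and the
-- first gap index as accumulator state (objective: alternative, same O(n) cost).

-- ===== PORT A =====
-- first loop of A: 'for reg in regions: if time <= reg[1] and time >= reg[0]: return -1'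
def aInRegion (time : Int) : List (List Int) → Bool
  | [] => false
  | reg :: rest =>
    if time ≤ PySem.List.pyGetD reg 1 0 ∧ PySem.List.pyGetD reg 0 0 ≤ time then true
    else aInRegion time rest

-- second loop of A over 'range(len(regions)-1)'
def aGapLoop (regions : List (List Int)) (time : Int) : List Int → Option Int
  | [] => none
  | idx :: rest =>
    if PySem.List.pyGetD (PySem.List.pyGetD regions idx []) 1 0 < time ∧
       time < PySem.List.pyGetD (PySem.List.pyGetD regions (idx + 1) []) 0 0
    then some (idx + 1)
    else aGapLoop regions time rest

def is_interstitial (regions : List (List Int)) (time : Int) : Int :=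
  if aInRegion time regions then -1
  else
    match aGapLoop regions time (PySem.List.pyRange 0 ((regions.length : Int) - 1) 1) with
    | some v => v
    | none => -2

-- ===== PORT B =====
-- single pass of Source B: state (gap, prev_end, idx)
def bLoop (time : Int) (gap : Option Int) (prevEnd : Option Int) (idx : Int) :
    List (List Int) → Int
  | [] => match gap with | none => -2 | some g => g
  | reg :: rest =>
    let r0 := PySem.List.pyGetD reg 0 0
    let r1 := PySem.List.pyGetD reg 1 0
    if r0 ≤ time ∧ time ≤ r1 then -1
    else
      let gap' : Option Int :=
        match gap with
        | some g => some g
        | none =>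
          match prevEnd with
          | none => none
          | some p => if p < time ∧ time < r0 then some idx else none
      bLoop time gap' (some r1) (idx + 1) rest

def is_interstitial_alt (regions : List (List Int)) (time : Int) : Int :=
  bLoop time none none 0 regions

-- ===== PRECONDITION & SPEC =====
-- Pre_ excludes inputs containing a region with fewer than 2 entries: on those 'reg[1]'
-- (or 'reg[0]') is an IndexError in both A and B, except when an earlier region already
-- contains the time point (then both still return -1, a value B matches anyway).
def Pre_is_interstitial (regions : List (List Int)) (time : Int) : Prop :=
  (regions.all (fun reg => 2 ≤ reg.length)) = true
instance (regions : List (List Int)) (time : Int) : Decidable (Pre_is_interstitial regions time) := by unfold Pre_is_interstitial; infer_instance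

def pvWitness_is_interstitial : List (List Int) × Int := ([[0, 1], [3, 4]], 2)

def Spec_is_interstitial (regions : List (List Int)) (time : Int) (out : Int) : Prop := out = is_interstitial_alt regions time
instance (regions : List (List Int)) (time : Int) (out : Int) : Decidable (Spec_is_interstitial regions time out) := by unfold Spec_is_interstitial; infer_instance

-- ===== CLAIM (what is proved, stated in full; the proofs are below) =====
def Claim_equal_is_interstitial : Prop := ∀ (regions : List (List Int)) (time : Int), Dom_is_interstitial regions time → Pre_is_interstitial regions time → Spec_is_interstitial regions time (is_interstitial regions time)

-- ===== LEMMAS AND PROOFS =====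

-- structural version of A's second loop: prev end, next region's start, index
def gapStruct (time p : Int) (idx : Int) : List (List Int) → Option Int
  | [] => none
  | reg :: rest =>
    if p < time ∧ time < PySem.List.pyGetD reg 0 0 then some idx
    else gapStruct time (PySem.List.pyGetD reg 1 0) (idx + 1) rest

-- A's indexed gap loop over pyRange equals the structural recursion on the suffix
theorem aGapLoop_eq_gapStruct (time : Int) :
    ∀ (rest : List (List Int)) (pre : List (List Int)) (r : List Int),
      aGapLoop (pre ++ r :: rest) time
          (PySem.List.pyRange (pre.length : Int) (((pre ++ r :: rest).length : Int) - 1) 1)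
        = gapStruct time (PySem.List.pyGetD r 1 0) ((pre.length : Int) + 1) rest := by
  intro rest
  induction rest with
  | nil =>
    intro pre r
    rw [PySem.List.pyRange_one_eq_nil (by simp)]
    rfl
  | cons r' rest' ih =>
    intro pre r
    rw [PySem.List.pyRange_one_cons (by simp; omega)]
    show (if _ then _ else _) = _
    have h1 : PySem.List.pyGetD (pre ++ r :: r' :: rest') (pre.length : Int) ([] : List Int) = r := by
      rw [PySem.List.pyGetD_natCast]
      simp [List.getD]
    have h2 : PySem.List.pyGetD (pre ++ r :: r' :: rest') ((pre.length : Int) + 1) ([] : List Int) = r' := by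
      have hc1 : ((pre.length : Int) + 1) = (((pre.length + 1 : Nat)) : Int) := by push_cast; ring
      rw [hc1, PySem.List.pyGetD_natCast]
      have hc2 : pre ++ r :: r' :: rest' = (pre ++ [r]) ++ r' :: rest' := by simp
      have hc3 : pre.length + 1 = (pre ++ [r]).length := by simp
      rw [hc2, hc3]
      simp [List.getD]
    rw [h1, h2]
    unfold gapStruct
    by_cases hc : PySem.List.pyGetD r 1 0 < time ∧ time < PySem.List.pyGetD r' 0 0
    · simp [hc]
    · rw [if_neg hc, if_neg hc]
      have := ih (pre ++ [r]) r'
      have e1 : (pre ++ [r]) ++ r' :: rest' = pre ++ r :: r' :: rest' := by simp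
      have e2 : (((pre ++ [r]).length : Nat) : Int) = (pre.length : Int) + 1 := by simp
      rw [e1, e2] at this
      rw [this]

-- B's loop, once prev_end is set, computes: containment first, else pending gap, else gapStruct
theorem bLoop_eq (time : Int) :
    ∀ (rest : List (List Int)) (gap : Option Int) (p idx : Int),
      bLoop time gap (some p) idx rest
        = (if aInRegion time rest then -1
           else match gap with
                | some g => g
                | none =>
                  match gapStruct time p idx rest with
                  | some v => v
                  | none => -2) := by
  intro rest
  induction rest with
  | nil =>
    intro gap p idx
    cases gap <;> simp [bLoop, aInRegion, gapStruct]
  | cons reg rest' ih =>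
    intro gap p idx
    simp only [bLoop, aInRegion, gapStruct]
    by_cases hA : time ≤ PySem.List.pyGetD reg 1 0 ∧ PySem.List.pyGetD reg 0 0 ≤ time
    · have hB : PySem.List.pyGetD reg 0 0 ≤ time ∧ time ≤ PySem.List.pyGetD reg 1 0 := ⟨hA.2, hA.1⟩
      rw [if_pos hA, if_pos hB]
      simp
    · have hB : ¬ (PySem.List.pyGetD reg 0 0 ≤ time ∧ time ≤ PySem.List.pyGetD reg 1 0) :=
        fun h => hA ⟨h.2, h.1⟩
      rw [if_neg hA, if_neg hB]
      cases gap with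
      | some g => rw [ih]
      | none =>
        by_cases hg : p < time ∧ time < PySem.List.pyGetD reg 0 0
        · rw [ih]
          cases h : aInRegion time rest' <;> simp [hg]
        · rw [ih]
          cases h : aInRegion time rest' <;> simp [hg]

-- ===== VERDICT (by name: the statement is the Claim_ definition above) =====
theorem is_interstitial_spec : Claim_equal_is_interstitial := by
  intro regions time _ _
  unfold Spec_is_interstitial is_interstitial is_interstitial_alt
  cases regions with
  | nil =>
    rw [PySem.List.pyRange_one_eq_nil (by simp)]
    rfl
  | cons r rest =>
    have hA := aGapLoop_eq_gapStruct time rest [] r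
    simp only [List.nil_append, List.length_nil, Nat.cast_zero, zero_add] at hA
    rw [hA]
    show _ = bLoop time none none 0 (r :: rest)
    simp only [bLoop]
    by_cases hc : time ≤ PySem.List.pyGetD r 1 0 ∧ PySem.List.pyGetD r 0 0 ≤ time
    · have hB : PySem.List.pyGetD r 0 0 ≤ time ∧ time ≤ PySem.List.pyGetD r 1 0 := ⟨hc.2, hc.1⟩
      rw [if_pos hB]
      have hin : aInRegion time (r :: rest) = true := by
        simp only [aInRegion]; rw [if_pos hc]
      rw [if_pos hin]
    · have hB : ¬ (PySem.List.pyGetD r 0 0 ≤ time ∧ time ≤ PySem.List.pyGetD r 1 0) :=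
        fun h => hc ⟨h.2, h.1⟩
      rw [if_neg hB, bLoop_eq]
      have hin : aInRegion time (r :: rest) = aInRegion time rest := by
        simp only [aInRegion]; rw [if_neg hc]
      rw [hin]
      cases h : aInRegion time rest <;> simp
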